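-- pv_equiv track=rewrite | github.com/astranero/tira | splitlist.py | count
-- ===== SOURCE A (Python) =====
-- def count(t):
--
--     lista_minimit = []
--     pienin = t[-1]
--     for i in range(len(t)-1,-1,-1):
--         if t[i] < pienin:
--             pienin = t[i]
--         lista_minimit.append(pienin)
--
--     lista_minimit.reverse()
--
--     osa_jonot = 0
--     suurin = t[0]
--     for i in range(0,len(t)):
--         if suurin < lista_minimit[i]:
--             osa_jonot += 1
--         if t[i] > suurin:
--             suurin = t[i]
--     return osa_jonot
-- ===== SOURCE B (Python) =====
-- def count(t):
--     biggest = t[0]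
--     osa_jonot = 0
--     for i in range(len(t)):
--         if biggest < min(t[i:]):
--             osa_jonot += 1
--         biggest = max(biggest, t[i])
--     return osa_jonot
-- ===== Notes on version B (the rewrite author's own statement) =====
-- stated objective: simpler
-- what changed: B drops A's backward pass and auxiliary suffix-minimum table entirely: a single forward loop recomputes the suffix minimum as min(t[i:]) at each step.
import Mathlib
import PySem

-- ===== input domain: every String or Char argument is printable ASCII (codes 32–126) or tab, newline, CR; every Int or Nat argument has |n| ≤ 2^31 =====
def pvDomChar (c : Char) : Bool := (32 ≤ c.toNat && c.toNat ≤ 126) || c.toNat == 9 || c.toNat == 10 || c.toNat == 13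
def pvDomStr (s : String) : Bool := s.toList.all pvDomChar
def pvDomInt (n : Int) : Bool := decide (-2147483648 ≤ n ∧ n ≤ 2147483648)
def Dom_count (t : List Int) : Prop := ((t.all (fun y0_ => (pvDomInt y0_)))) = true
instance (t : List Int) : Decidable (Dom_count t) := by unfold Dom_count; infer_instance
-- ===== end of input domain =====

-- B drops A's backward pass and suffix-minimum table: one forward loop rescanning min(t[i:]).
-- ===== PORT A =====
def count (t : List Int) : Int :=
  match PySem.List.pyGet? t (-1) with
  | none => 0
  | some last =>
    let st := (PySem.List.pyRange ((t.length : Int) - 1) (-1) (-1)).foldl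
      (fun (st : List Int × Int) i =>
        let pienin := if PySem.List.pyGetD t i 0 < st.2 then PySem.List.pyGetD t i 0 else st.2
        (st.1 ++ [pienin], pienin)) ([], last)
    let mins := st.1.reverse
    match PySem.List.pyGet? t 0 with
    | none => 0
    | some first =>
      ((PySem.List.pyRange 0 (t.length : Int) 1).foldl
        (fun (st : Int × Int) i =>
          let c := if st.2 < PySem.List.pyGetD mins i 0 then st.1 + 1 else st.1
          let suurin := if PySem.List.pyGetD t i 0 > st.2 then PySem.List.pyGetD t i 0 else st.2
          (c, suurin)) (0, first)).1

-- ===== PORT B =====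
def count_alt (t : List Int) : Int :=
  match PySem.List.pyGet? t 0 with
  | none => 0
  | some first =>
    ((PySem.List.pyRange 0 (t.length : Int) 1).foldl
      (fun (st : Int × Int) i =>
        let m := (PySem.List.min? (PySem.List.slice t (some i) none) (fun x => x)).getD 0
        let c := if st.2 < m then st.1 + 1 else st.1
        let biggest := max st.2 (PySem.List.pyGetD t i 0)
        (c, biggest)) (0, first)).1

-- ===== PRECONDITION & SPEC =====
-- Pre_ excludes only the empty list, on which A raises IndexError (t[-1]).
def Pre_count (t : List Int) : Prop := t ≠ []
instance (t : List Int) : Decidable (Pre_count t) := by unfold Pre_count; infer_instance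
def pvWitness_count : List Int := [1, 3, 2]
def Spec_count (t : List Int) (out : Int) : Prop := out = count_alt t
instance (t : List Int) (out : Int) : Decidable (Spec_count t out) := by unfold Spec_count; infer_instance

-- ===== CLAIM (what is proved, stated in full; the proofs are below) =====
def Claim_equal_count : Prop := ∀ (t : List Int), Dom_count t → Pre_count t → Spec_count t (count t)

-- ===== LEMMAS AND PROOFS =====

/-- min of a nonempty list, as Python's `min` computes it (0 on []). -/
def smin : List Int → Int
  | [] => 0
  | x :: xs => xs.foldl min x

theorem foldl_min_out (l : List Int) : ∀ (y x : Int), min (l.foldl min y) x = l.foldl min (min y x) := by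
  induction l with
  | nil => intro y x; rfl
  | cons z l ih =>
    intro y x
    simp only [List.foldl_cons]
    rw [ih]
    congr 1
    omega

theorem smin_cons (x : Int) (l : List Int) (hl : l ≠ []) :
    smin (x :: l) = min x (smin l) := by
  match l, hl with
  | y :: l, _ =>
    show (y :: l).foldl min x = min x (l.foldl min y)
    rw [List.foldl_cons, min_comm x (l.foldl min y), foldl_min_out]
    congr 1
    omega

theorem descLoop (t : List Int) : ∀ (j : Nat), j < t.length → ∀ (acc : List Int) (p : Int),
    min p (t.getD j 0) = smin (t.drop j) →
    ((PySem.List.pyRange ((j : Int)) (-1) (-1)).foldl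
      (fun (st : List Int × Int) i =>
        let pienin := if PySem.List.pyGetD t i 0 < st.2 then PySem.List.pyGetD t i 0 else st.2
        (st.1 ++ [pienin], pienin)) (acc, p)).1
    = acc ++ (List.range (j+1)).map (fun k => smin (t.drop (j - k))) := by
  intro j
  induction j with
  | zero =>
    intro hj acc p hp
    rw [PySem.List.pyRange_neg_one_cons (by omega)]
    rw [show ((0:Nat):Int) - 1 = (-1 : Int) by norm_num, PySem.List.pyRange_neg_one_eq_nil (by omega)]
    rw [show ((0:Nat):Int) = (0:Int) by norm_num]
    simp only [List.foldl_cons, List.foldl_nil]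
    have hg : PySem.List.pyGetD t (0:Int) 0 = t.getD 0 0 := PySem.List.pyGetD_zero t 0
    have hmin : (if PySem.List.pyGetD t (0:Int) 0 < p then PySem.List.pyGetD t (0:Int) 0 else p)
        = min p (t.getD 0 0) := by rw [hg]; split_ifs <;> omega
    simp only [hmin, hp]
    simp
  | succ j ih =>
    intro hj acc p hp
    rw [PySem.List.pyRange_neg_one_cons (by omega)]
    have hco : ((j + 1 : Nat) : Int) - 1 = ((j : Nat) : Int) := by push_cast; omega
    rw [hco]
    simp only [List.foldl_cons]
    have hg : PySem.List.pyGetD t (((j+1 : Nat)) : Int) 0 = t.getD (j+1) 0 :=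
      PySem.List.pyGetD_natCast ..
    have hmin : (if PySem.List.pyGetD t (((j+1 : Nat)) : Int) 0 < p then PySem.List.pyGetD t (((j+1 : Nat)) : Int) 0 else p)
        = min p (t.getD (j+1) 0) := by rw [hg]; split_ifs <;> omega
    simp only [hmin, hp]
    have hdrop : t.drop j = t[j] :: t.drop (j+1) := List.drop_eq_getElem_cons (by omega)
    have hne : t.drop (j+1) ≠ [] := by
      have : (t.drop (j+1)).length = t.length - (j+1) := List.length_drop ..
      intro h; rw [h] at this; simp at this; omega
    have hstep : min (smin (t.drop (j+1))) (t.getD j 0) = smin (t.drop j) := by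
      rw [hdrop, smin_cons _ _ hne]
      have : t.getD j 0 = t[j] := List.getD_eq_getElem t 0 (by omega)
      rw [this]; omega
    rw [ih (by omega) (acc ++ [smin (t.drop (j+1))]) (smin (t.drop (j+1))) hstep]
    rw [List.append_assoc]
    congr 1
    conv_rhs => rw [List.range_succ_eq_map]
    simp only [List.map_cons, List.map_map, Nat.sub_zero, List.singleton_append]
    refine List.cons_eq_cons.mpr ⟨rfl, ?_⟩
    apply List.map_congr_left
    intro k _
    simp only [Function.comp_apply]
    congr 2
    omega

theorem mins_spec (t : List Int) (ht : t ≠ []) (last : Int) (hl : t.getLast? = some last) :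
    ((PySem.List.pyRange ((t.length : Int) - 1) (-1) (-1)).foldl
      (fun (st : List Int × Int) i =>
        let pienin := if PySem.List.pyGetD t i 0 < st.2 then PySem.List.pyGetD t i 0 else st.2
        (st.1 ++ [pienin], pienin)) ([], last)).1.reverse
    = (List.range t.length).map (fun i => smin (t.drop i)) := by
  have hn : 0 < t.length := List.length_pos_iff.mpr ht
  have hco : ((t.length : Int) - 1) = (((t.length - 1 : Nat)) : Int) := by push_cast [hn]; omega
  have hlast : last = t[t.length - 1] := by
    rw [List.getLast?_eq_getLast ht] at hl
    rw [← Option.some_inj.mp hl, List.getLast_eq_getElem]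
  have hdrop : t.drop (t.length - 1) = [t[t.length - 1]] := by
    apply List.ext_getElem
    · simp; omega
    · intro i h1 h2
      simp at h2
      subst h2
      simp [List.getElem_drop]
  have hinit : min last (t.getD (t.length - 1) 0) = smin (t.drop (t.length - 1)) := by
    rw [hdrop, hlast]
    have : t.getD (t.length - 1) 0 = t[t.length - 1] := List.getD_eq_getElem t 0 (by omega)
    rw [this]
    show min t[t.length-1] t[t.length-1] = smin [t[t.length-1]]
    simp [smin]
  rw [hco, descLoop t (t.length - 1) (by omega) [] last hinit]
  simp only [List.nil_append]
  have hrl : t.length - 1 + 1 = t.length := by omega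
  rw [hrl]
  apply List.ext_getElem
  · simp
  · intro i h1 h2
    simp only [List.length_reverse, List.length_map, List.length_range] at h1 h2
    rw [List.getElem_reverse]
    simp only [List.getElem_map, List.getElem_range, List.length_map, List.length_range]
    congr 2
    omega

theorem max_eq_if (a b : Int) : max a b = if b > a then b else a := by
  split_ifs <;> omega

-- ===== VERDICT (by name: the statement is the Claim_ definition above) =====
theorem count_spec : Claim_equal_count := by
  intro t _ ht
  unfold Spec_count count count_alt
  match t, ht with
  | x :: xs, ht =>
    have h0 : PySem.List.pyGet? (x :: xs) 0 = some x := PySem.List.pyGet?_zero_cons x xs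
    have hlast : PySem.List.pyGet? (x :: xs) (-1) = (x :: xs).getLast? := PySem.List.pyGet?_neg_one _
    rw [List.getLast?_eq_getLast (by simp)] at hlast
    rw [h0, hlast]
    simp only []
    rw [mins_spec (x :: xs) (by simp) _ (by rw [List.getLast?_eq_getLast (by simp)])]
    congr 1
    apply PySem.List.foldl_congr_mem
    intro st i hi
    rw [PySem.List.mem_pyRange_one] at hi
    have hlen : ((List.range (x :: xs).length).map (fun i => smin ((x :: xs).drop i))).length = (x :: xs).length := by simp
    have hA : PySem.List.pyGetD ((List.range (x :: xs).length).map (fun i => smin ((x :: xs).drop i))) i 0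
        = smin ((x :: xs).drop i.toNat) := by
      rw [PySem.List.pyGetD_eq_getElem _ _ hi.1 (by simp only [List.length_map, List.length_range]; exact hi.2)]
      simp only [List.getElem_map, List.getElem_range]
    have hB : (PySem.List.min? (PySem.List.slice (x :: xs) (some i) none) (fun x => x)).getD 0
        = smin ((x :: xs).drop i.toNat) := by
      rw [PySem.List.slice_from _ hi.1]
      have hcons : (x :: xs).drop i.toNat = (x :: xs)[i.toNat] :: (x :: xs).drop (i.toNat + 1) :=
        List.drop_eq_getElem_cons (by omega)
      rw [hcons, PySem.List.min?_id_cons]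
      rfl
    rw [hA, hB, max_eq_if]
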